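-- pv_equiv track=rewrite | github.com/saikrupa82/mypyth | python class clg/vowels.py | vowco
-- ===== SOURCE A (Python) =====
-- def vowco(s):
-- 	r,f,g,k=0,0,0,0
-- 	for i in s:
--
-- 		if i.isalpha():
-- 			if i=="a"or i=="o" or i=="i"or i=="u"or i=="e" :
-- 				r+=1
-- 			else:
-- 				g+=1
-- 		elif not i.isalnum():
-- 			f+=1
-- 		elif i.isnumeric():
-- 			k+=1
-- 	return("This vowels are",r,"\nThe special character are",f,"\nThe constonts are",g,"\nThe digits are ",k)
-- ===== SOURCE B (Python) =====
-- def vowco(s):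
--     vowels = "aeiou"
--     r = sum(c in vowels for c in s)
--     g = sum(c.isalpha() and c not in vowels for c in s)
--     f = sum(not c.isalnum() for c in s)
--     k = sum(c.isdigit() for c in s)
--     return ("This vowels are", r, "\nThe special character are", f, "\nThe constonts are", g, "\nThe digits are ", k)
-- ===== Notes on version B (the rewrite author's own statement) =====
-- stated objective: idiomatic
-- what changed: Replaced A's single loop with a four-way if/elif branch chain and four mutable counters by four independent one-predicate counting passes (sum of a boolean per category), returning the same literal tuple.
import Mathlib
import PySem

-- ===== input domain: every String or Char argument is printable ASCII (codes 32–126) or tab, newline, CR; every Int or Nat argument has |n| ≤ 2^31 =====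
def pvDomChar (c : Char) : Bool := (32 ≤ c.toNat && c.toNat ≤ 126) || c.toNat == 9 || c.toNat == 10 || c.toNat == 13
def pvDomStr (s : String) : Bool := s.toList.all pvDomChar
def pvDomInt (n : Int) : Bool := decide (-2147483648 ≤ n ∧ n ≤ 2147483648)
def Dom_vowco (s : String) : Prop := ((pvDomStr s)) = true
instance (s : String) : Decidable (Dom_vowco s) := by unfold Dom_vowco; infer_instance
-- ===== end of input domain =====

-- B replaces A's single branching loop by four independent category-counting passes (one count per category); objective: idiomatic, same asymptotic cost.


-- ===== PORT A =====
-- literal transliteration of A's single loop (the loop body as a named step function);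
-- i.isnumeric() is ported as PySem.Chars.isdigit, exact on the ASCII domain Dom_vowco
def vowcoStep (st : Int × Int × Int × Int) (i : Char) : Int × Int × Int × Int :=
  let (r, f, g, k) := st
  if PySem.Chars.isalpha i then
    if i == 'a' || i == 'o' || i == 'i' || i == 'u' || i == 'e' then (r + 1, f, g, k)
    else (r, f, g + 1, k)
  else if !(PySem.Chars.isalnum i) then (r, f + 1, g, k)
  else if PySem.Chars.isdigit i then (r, f, g, k + 1)
  else (r, f, g, k)

def vowco (s : String) : String × Int × String × Int × String × Int × String × Int :=
  let st := s.toList.foldl vowcoStep (0, 0, 0, 0)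
  ("This vowels are", st.1, "\nThe special character are", st.2.1,
   "\nThe constonts are", st.2.2.1, "\nThe digits are ", st.2.2.2)

-- ===== PORT B =====
-- 'c in vowels' for a single char is membership in the vowel characters
def vowco_alt (s : String) : String × Int × String × Int × String × Int × String × Int :=
  let cs := s.toList
  let vowels : List Char := ['a', 'e', 'i', 'o', 'u']
  let r : Int := cs.countP (fun c => vowels.contains c)
  let g : Int := cs.countP (fun c => PySem.Chars.isalpha c && !(vowels.contains c))
  let f : Int := cs.countP (fun c => !(PySem.Chars.isalnum c))
  let k : Int := cs.countP (fun c => PySem.Chars.isdigit c)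
  ("This vowels are", r, "\nThe special character are", f,
   "\nThe constonts are", g, "\nThe digits are ", k)

-- ===== PRECONDITION & SPEC =====
def Spec_vowco (s : String) (out : String × Int × String × Int × String × Int × String × Int) : Prop := out = vowco_alt s
instance (s : String) (out : String × Int × String × Int × String × Int × String × Int) : Decidable (Spec_vowco s out) := by
  unfold Spec_vowco
  -- instance search hits its size limit on the 8-tuple; build the Prod chain explicitly
  haveI d2 : DecidableEq (String × Int) := instDecidableEqProd
  haveI d3 : DecidableEq (Int × String × Int) := instDecidableEqProd
  haveI d4 : DecidableEq (String × Int × String × Int) := instDecidableEqProd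
  haveI d5 : DecidableEq (Int × String × Int × String × Int) := instDecidableEqProd
  haveI d6 : DecidableEq (String × Int × String × Int × String × Int) := instDecidableEqProd
  haveI d7 : DecidableEq (Int × String × Int × String × Int × String × Int) := instDecidableEqProd
  haveI d8 : DecidableEq (String × Int × String × Int × String × Int × String × Int) := instDecidableEqProd
  exact d8 out (vowco_alt s)

-- ===== CLAIM (what is proved, stated in full; the proofs are below) =====
def Claim_equal_vowco : Prop := ∀ (s : String), Dom_vowco s → Spec_vowco s (vowco s)

-- ===== LEMMAS AND PROOFS =====

def pvVowels : List Char := ['a', 'e', 'i', 'o', 'u']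

-- a digit is never a letter (disjoint ASCII ranges)
theorem vowco_digit_not_alpha (c : Char) (h : PySem.Chars.isdigit c = true) :
    PySem.Chars.isalpha c = false := by
  have h0 : '0'.val.toNat = 48 := rfl
  have h9 : '9'.val.toNat = 57 := rfl
  have hA : 'A'.val.toNat = 65 := rfl
  have hZ : 'Z'.val.toNat = 90 := rfl
  have ha : 'a'.val.toNat = 97 := rfl
  have hz : 'z'.val.toNat = 122 := rfl
  simp only [PySem.Chars.isalpha, PySem.Chars.isupper, PySem.Chars.islower, PySem.Chars.isdigit,
    Bool.and_eq_true, Bool.or_eq_false_iff, Bool.and_eq_false_iff, decide_eq_true_eq,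
    decide_eq_false_iff_not, not_le, Char.le_def, UInt32.le_iff_toNat_le] at *
  omega

-- the per-character contribution of A's branch chain equals the four B predicates
theorem vowco_step (c : Char) (r f g k : Int) :
    vowcoStep (r, f, g, k) c =
    (r + (if pvVowels.contains c then 1 else 0),
     f + (if !(PySem.Chars.isalnum c) then 1 else 0),
     g + (if PySem.Chars.isalpha c && !(pvVowels.contains c) then 1 else 0),
     k + (if PySem.Chars.isdigit c then 1 else 0)) := by
  have halnum : PySem.Chars.isalnum c = (PySem.Chars.isalpha c || PySem.Chars.isdigit c) := rfl
  by_cases hV : c ∈ pvVowels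
  · -- a vowel: every predicate is a closed computation on one of five literal characters
    fin_cases hV <;>
      simp [vowcoStep, pvVowels, PySem.Chars.isalpha, PySem.Chars.isalnum, PySem.Chars.isupper,
        PySem.Chars.islower, PySem.Chars.isdigit]
  · have hvF : pvVowels.contains c = false := by simpa [List.contains_eq_mem] using hV
    have hvA : (c == 'a' || c == 'o' || c == 'i' || c == 'u' || c == 'e') = false := by
      simp only [pvVowels, List.mem_cons, List.not_mem_nil, or_false, not_or] at hV
      obtain ⟨n1, n2, n3, n4, n5⟩ := hV
      simp [n1, n2, n3, n4, n5]
    by_cases hA : PySem.Chars.isalpha c = true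
    · have hd : PySem.Chars.isdigit c = false := by
        by_cases hd : PySem.Chars.isdigit c = true
        · rw [vowco_digit_not_alpha c hd] at hA; exact absurd hA (by simp)
        · simpa using hd
      simp [vowcoStep, hA, hvA, halnum, hd]
      exact hV
    · simp only [Bool.not_eq_true] at hA
      by_cases hd : PySem.Chars.isdigit c = true <;>
        · simp [vowcoStep, hA, halnum, hd]
          try exact hV

theorem vowco_loop (cs : List Char) : ∀ (r f g k : Int),
    cs.foldl vowcoStep (r, f, g, k) =
    (r + cs.countP (fun c => pvVowels.contains c),
     f + cs.countP (fun c => !(PySem.Chars.isalnum c)),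
     g + cs.countP (fun c => PySem.Chars.isalpha c && !(pvVowels.contains c)),
     k + cs.countP (fun c => PySem.Chars.isdigit c)) := by
  induction cs with
  | nil => intro r f g k; simp
  | cons c cs ih =>
    intro r f g k
    rw [List.foldl_cons, vowco_step, ih]
    simp only [List.countP_cons, Prod.mk.injEq]
    refine ⟨?_, ?_, ?_, ?_⟩ <;> push_cast <;> split_ifs <;> ring

-- ===== VERDICT (by name: the statement is the Claim_ definition above) =====
theorem vowco_spec : Claim_equal_vowco := by
  intro s _
  unfold Spec_vowco vowco vowco_alt
  rw [vowco_loop]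
  simp [pvVowels]
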